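-- pv_equiv track=rewrite | github.com/bk4000/GaugeCNN | conv.py | SO2RepDim
-- ===== SOURCE A (Python) =====
-- def SO2RepDim(rep):
--     if type(rep) == int:
--         return 1 if rep == 0 else 2
--     elif type(rep) == dict:
--         dim = 0
--         for n, mult in rep.items():
--             dim += (1 if n == 0 else 2) * mult
--         return dim
-- ===== SOURCE B (Python) =====
-- def SO2RepDim(rep):
--     if type(rep) == int:
--         return 1 if rep == 0 else 2
--     elif type(rep) == dict:
--         return 2 * sum(rep.values()) - rep.get(0, 0)
-- ===== Notes on version B (the rewrite author's own statement) =====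
-- stated objective: simpler
-- what changed: Replaces the per-entry accumulating loop with the closed form 2*sum(values) - get(0,0); Pre_ requires distinct keys, since an association list with duplicate keys does not represent a Python dict.
import Mathlib
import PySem

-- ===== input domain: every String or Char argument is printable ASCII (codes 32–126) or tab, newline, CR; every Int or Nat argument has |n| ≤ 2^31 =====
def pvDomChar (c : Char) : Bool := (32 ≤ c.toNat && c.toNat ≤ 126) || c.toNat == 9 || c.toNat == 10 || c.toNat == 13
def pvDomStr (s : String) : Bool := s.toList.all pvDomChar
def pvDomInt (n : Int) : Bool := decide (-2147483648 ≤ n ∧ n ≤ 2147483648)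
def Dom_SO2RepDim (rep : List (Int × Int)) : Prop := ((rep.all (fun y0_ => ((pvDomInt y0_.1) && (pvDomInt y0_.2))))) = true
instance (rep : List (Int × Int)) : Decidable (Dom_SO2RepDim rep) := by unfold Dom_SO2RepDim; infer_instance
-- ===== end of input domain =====

-- ===== PORT A =====
-- A's dict branch: accumulate (1 if n == 0 else 2) * mult over the items.
def SO2RepDim (rep : List (Int × Int)) : Int :=
  rep.foldl (fun dim p => dim + (if p.1 = 0 then 1 else 2) * p.2) 0

-- ===== PORT B =====
-- B: closed form 2 * sum(rep.values()) - rep.get(0, 0).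
def SO2RepDim_alt (rep : List (Int × Int)) : Int :=
  2 * (rep.map Prod.snd).sum - (PySem.Dict.mk rep).getD 0 0

-- ===== PRECONDITION & SPEC =====
-- Pre_ requires distinct keys: an association list with duplicate keys does not
-- represent any Python dict (dict keys are unique), so nothing is claimed there.
def Pre_SO2RepDim (rep : List (Int × Int)) : Prop := (rep.map Prod.fst).Nodup
instance (rep : List (Int × Int)) : Decidable (Pre_SO2RepDim rep) := by unfold Pre_SO2RepDim; infer_instance
def pvWitness_SO2RepDim : (List (Int × Int)) := [(0, 3), (1, 2), (-2, 5)]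

def Spec_SO2RepDim (rep : List (Int × Int)) (out : Int) : Prop := out = SO2RepDim_alt rep
instance (rep : List (Int × Int)) (out : Int) : Decidable (Spec_SO2RepDim rep out) := by unfold Spec_SO2RepDim; infer_instance

-- ===== CLAIM (what is proved, stated in full; the proofs are below) =====
def Claim_equal_SO2RepDim : Prop := ∀ (rep : List (Int × Int)), Dom_SO2RepDim rep → Pre_SO2RepDim rep → Spec_SO2RepDim rep (SO2RepDim rep)

-- ===== LEMMAS AND PROOFS =====

theorem so2_foldl_shift (rep : List (Int × Int)) (a : Int) :
    rep.foldl (fun dim p => dim + (if p.1 = 0 then 1 else 2) * p.2) a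
      = a + rep.foldl (fun dim p => dim + (if p.1 = 0 then 1 else 2) * p.2) 0 := by
  induction rep generalizing a with
  | nil => simp
  | cons h t ih =>
    simp only [List.foldl_cons]
    rw [ih]
    conv_rhs => rw [ih]
    ring

theorem so2_getD_zero_of_no_zero (t : List (Int × Int)) (h : (0 : Int) ∉ t.map Prod.fst) :
    (PySem.Dict.mk t).getD 0 0 = 0 := by
  apply PySem.Dict.getD_of_not_contains
  simp only [PySem.Dict.contains_mk, List.any_eq_false, beq_iff_eq]
  intro p hp hpk
  exact h (by simpa [hpk] using List.mem_map_of_mem (f := Prod.fst) hp)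

theorem so2_main (rep : List (Int × Int)) (hnd : (rep.map Prod.fst).Nodup) :
    SO2RepDim rep = SO2RepDim_alt rep := by
  induction rep with
  | nil => simp [SO2RepDim, SO2RepDim_alt, PySem.Dict.getD, PySem.Dict.get?]
  | cons hd t ih =>
    obtain ⟨n, m⟩ := hd
    simp only [List.map_cons, List.nodup_cons] at hnd
    obtain ⟨hn0, hndt⟩ := hnd
    have ht := ih hndt
    simp only [SO2RepDim, SO2RepDim_alt, List.foldl_cons, List.map_cons, List.sum_cons] at ht ⊢
    have hget : (PySem.Dict.mk ((n, m) :: t)).getD 0 0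
        = if n = 0 then m else (PySem.Dict.mk t).getD 0 0 := by
      simp only [PySem.Dict.getD_eq_get?_getD, PySem.Dict.get?_mk_cons]
      by_cases h : n = 0 <;> simp [h]
    rw [so2_foldl_shift, ht, hget]
    by_cases h : n = 0
    · subst h
      rw [so2_getD_zero_of_no_zero t hn0]
      norm_num
      ring
    · simp only [if_neg h]
      ring

-- ===== VERDICT (by name: the statement is the Claim_ definition above) =====
theorem SO2RepDim_spec : Claim_equal_SO2RepDim := by
  intro rep _ hpre
  exact so2_main rep hpre
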